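-- pv_equiv track=rewrite | github.com/denoflore/ZFD | 06_Pipelines/zfd_decoder_v2.py | eva_to_croatian
-- ===== SOURCE A (Python) =====
-- EVA_TO_CRO = {
--     # Consonant clusters
--     "cth": "ctrr",
--     "ckh": "cst",
--     "cph": "cpll",
--     "cfh": "cpll",
--     "pch": "ph",
--     "tch": "th",
--     "sch": "šh",
--     # Gallows characters
--     "ch": "h",
--     "sh": "š",
--     "ck": "st",
--     "cf": "pl",
--     "cp": "pl",
--     # Simple consonants
--     "k": "st",
--     "t": "t",
--     "p": "p",
--     "f": "f",
--     "d": "d",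
--     "l": "l",
--     "r": "r",
--     "s": "s",
--     "n": "n",
--     "m": "m",
--     "g": "g",
--     "q": "k",
--     # Vowels
--     "a": "a",
--     "o": "o",
--     "e": "e",
--     "i": "i",
--     "y": "y",
--     "u": "u",
-- }
--
-- EVA_SORTED = sorted(EVA_TO_CRO.keys(), key=len, reverse=True)
--
-- def eva_to_croatian(eva_text):
--     """Convert EVA alphabet to Croatian/Latin characters"""
--     result = []
--     i = 0
--     text = eva_text.lower().strip()
--
--     while i < len(text):
--         matched = False
--         for seq in EVA_SORTED:
--             if text[i:i+len(seq)] == seq: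
--                 result.append(EVA_TO_CRO[seq])
--                 i += len(seq)
--                 matched = True
--                 break
--         if not matched:
--             result.append(text[i])
--             i += 1
--
--     return "".join(result)
-- ===== SOURCE B (Python) =====
-- # B: longest-match transliteration via three length-indexed hash tables (one
-- # .get per candidate length) instead of scanning the whole sorted key list at
-- # every position.
-- _T3 = {"cth": "ctrr", "ckh": "cst", "cph": "cpll", "cfh": "cpll",
--        "pch": "ph", "tch": "th", "sch": "\u0161h"}
-- _T2 = {"ch": "h", "sh": "\u0161", "ck": "st", "cf": "pl", "cp": "pl"}
-- _T1 = {"k": "st", "t": "t", "p": "p", "f": "f", "d": "d", "l": "l",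
--        "r": "r", "s": "s", "n": "n", "m": "m", "g": "g", "q": "k",
--        "a": "a", "o": "o", "e": "e", "i": "i", "y": "y", "u": "u"}
--
-- def eva_to_croatian(eva_text):
--     """Convert EVA alphabet to Croatian/Latin characters"""
--     text = eva_text.lower().strip()
--     out = []
--     i = 0
--     n = len(text)
--     while i < n:
--         r = _T3.get(text[i:i+3])
--         if r is not None:
--             out.append(r)
--             i += 3
--             continue
--         r = _T2.get(text[i:i+2])
--         if r is not None:
--             out.append(r)
--             i += 2
--             continue
--         c = text[i]
--         out.append(_T1.get(c, c))
--         i += 1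
--     return "".join(out)
-- ===== Notes on version B (the rewrite author's own statement) =====
-- stated objective: faster
-- what changed: Replaces the per-position linear scan over all 30 length-sorted keys (with a slice comparison per key) by three length-indexed hash tables, doing at most three dict lookups per position; greedy longest-match is preserved because key lengths are only 3, 2 and 1.
import Mathlib
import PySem

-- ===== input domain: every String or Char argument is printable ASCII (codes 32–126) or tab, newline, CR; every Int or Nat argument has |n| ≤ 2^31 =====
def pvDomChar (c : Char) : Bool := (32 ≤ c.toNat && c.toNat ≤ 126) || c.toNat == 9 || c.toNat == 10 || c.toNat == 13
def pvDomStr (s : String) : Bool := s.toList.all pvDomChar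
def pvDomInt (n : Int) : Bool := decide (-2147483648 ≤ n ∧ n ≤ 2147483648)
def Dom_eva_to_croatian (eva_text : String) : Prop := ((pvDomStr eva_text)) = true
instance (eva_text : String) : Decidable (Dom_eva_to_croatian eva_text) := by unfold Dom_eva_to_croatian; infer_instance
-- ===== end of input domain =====

-- B replaces A's per-position scan over the whole length-sorted key list by three
-- length-indexed hash tables (one lookup per candidate length); same return value.
-- Strings are carried as List Char (PySem's string carrier); dict keys/values are
-- the .toList of Python's str keys/values.

-- ===== PORT A =====
-- EVA_TO_CRO
def evaToCro : PySem.Dict (List Char) (List Char) := PySem.Dict.ofList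
  [ ("cth".toList, "ctrr".toList), ("ckh".toList, "cst".toList), ("cph".toList, "cpll".toList)
  , ("cfh".toList, "cpll".toList), ("pch".toList, "ph".toList), ("tch".toList, "th".toList)
  , ("sch".toList, "šh".toList)
  , ("ch".toList, "h".toList), ("sh".toList, "š".toList), ("ck".toList, "st".toList)
  , ("cf".toList, "pl".toList), ("cp".toList, "pl".toList)
  , ("k".toList, "st".toList), ("t".toList, "t".toList), ("p".toList, "p".toList)
  , ("f".toList, "f".toList), ("d".toList, "d".toList), ("l".toList, "l".toList)
  , ("r".toList, "r".toList), ("s".toList, "s".toList), ("n".toList, "n".toList)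
  , ("m".toList, "m".toList), ("g".toList, "g".toList), ("q".toList, "k".toList)
  , ("a".toList, "a".toList), ("o".toList, "o".toList), ("e".toList, "e".toList)
  , ("i".toList, "i".toList), ("y".toList, "y".toList), ("u".toList, "u".toList) ]

-- EVA_SORTED = sorted(EVA_TO_CRO.keys(), key=len, reverse=True)
def evaSorted : List (List Char) := PySem.List.sorted evaToCro.keys (fun s => PySem.Chars.len s) true

-- the inner 'for seq in EVA_SORTED: if text[i:i+len(seq)] == seq: …; break';
-- the loop state i is carried as the remaining suffix text.drop i, on which the
-- slice text[i:i+len(seq)] is exactly '.take seq.length' (0 ≤ i < len(text) here).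
-- EVA_TO_CRO[seq] is ported as getD [] (every seq ∈ EVA_SORTED is a key, so the
-- default is never read).
def aFind (rest : List Char) : List (List Char) → Option (List Char × Nat)
  | [] => none
  | seq :: more =>
      if rest.take seq.length = seq then
        some ((evaToCro.get? seq).getD [], seq.length)
      else aFind rest more

-- the 'while i < len(text)' loop; fuel = len(text) only makes it total (each
-- iteration consumes at least one character).
def aLoop : Nat → List Char → List (List Char)
  | 0, _ => []
  | _ + 1, [] => []
  | fuel + 1, c :: rest =>
      match aFind (c :: rest) evaSorted with
      | some (o, L) => o :: aLoop fuel ((c :: rest).drop L)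
      | none => [c] :: aLoop fuel rest

def eva_to_croatian (eva_text : String) : String :=
  let text := PySem.Chars.strip (PySem.Chars.lower eva_text.toList)
  String.ofList (PySem.Chars.join [] (aLoop text.length text))

-- ===== PORT B =====
def croT3 : PySem.Dict (List Char) (List Char) := PySem.Dict.ofList
  [ ("cth".toList, "ctrr".toList), ("ckh".toList, "cst".toList), ("cph".toList, "cpll".toList)
  , ("cfh".toList, "cpll".toList), ("pch".toList, "ph".toList), ("tch".toList, "th".toList)
  , ("sch".toList, "šh".toList) ]

def croT2 : PySem.Dict (List Char) (List Char) := PySem.Dict.ofList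
  [ ("ch".toList, "h".toList), ("sh".toList, "š".toList), ("ck".toList, "st".toList)
  , ("cf".toList, "pl".toList), ("cp".toList, "pl".toList) ]

def croT1 : PySem.Dict (List Char) (List Char) := PySem.Dict.ofList
  [ ("k".toList, "st".toList), ("t".toList, "t".toList), ("p".toList, "p".toList)
  , ("f".toList, "f".toList), ("d".toList, "d".toList), ("l".toList, "l".toList)
  , ("r".toList, "r".toList), ("s".toList, "s".toList), ("n".toList, "n".toList)
  , ("m".toList, "m".toList), ("g".toList, "g".toList), ("q".toList, "k".toList)
  , ("a".toList, "a".toList), ("o".toList, "o".toList), ("e".toList, "e".toList)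
  , ("i".toList, "i".toList), ("y".toList, "y".toList), ("u".toList, "u".toList) ]

-- B's 'while i < n' with .get lookups on text[i:i+3], text[i:i+2], text[i];
-- state i carried as the remaining suffix, slices as '.take'.
def bLoop : List Char → List (List Char)
  | [] => []
  | c :: rest =>
      match croT3.get? ((c :: rest).take 3) with
      | some r => r :: bLoop ((c :: rest).drop 3)
      | none =>
        match croT2.get? ((c :: rest).take 2) with
        | some r => r :: bLoop ((c :: rest).drop 2)
        | none => (croT1.getD [c] [c]) :: bLoop rest
  termination_by cs => cs.length
  decreasing_by all_goals (simp only [List.length_drop, List.length_cons]; omega)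

def eva_to_croatian_alt (eva_text : String) : String :=
  let text := PySem.Chars.strip (PySem.Chars.lower eva_text.toList)
  String.ofList (PySem.Chars.join [] (bLoop text))

-- ===== PRECONDITION & SPEC =====
def Spec_eva_to_croatian (eva_text : String) (out : String) : Prop := out = eva_to_croatian_alt eva_text
instance (eva_text : String) (out : String) : Decidable (Spec_eva_to_croatian eva_text out) := by unfold Spec_eva_to_croatian; infer_instance

-- ===== CLAIM (what is proved, stated in full; the proofs are below) =====
def Claim_equal_eva_to_croatian : Prop := ∀ (eva_text : String), Dom_eva_to_croatian eva_text → Spec_eva_to_croatian eva_text (eva_to_croatian eva_text)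

-- ===== LEMMAS AND PROOFS =====

-- aFind distributes over appending key lists (first match wins).
lemma aFind_append (s : List Char) : ∀ (l1 l2 : List (List Char)),
    aFind s (l1 ++ l2) = (aFind s l1).or (aFind s l2) := by
  intro l1 l2
  induction l1 with
  | nil => simp [aFind]
  | cons k l1' ih =>
      simp only [List.cons_append, aFind]
      split_ifs with hk
      · simp [Option.or]
      · exact ih

-- scanning a key list whose keys all have length L is one dict lookup of s.take L.
lemma aFind_fixed (s : List Char) (L : Nat) : ∀ (ks : List (List Char)),
    (∀ k ∈ ks, k.length = L) →
    aFind s ks =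
      match (PySem.Dict.mk (ks.map (fun k => (k, (evaToCro.get? k).getD [])))).get? (s.take L) with
      | some r => some (r, L)
      | none => none := by
  intro ks
  induction ks with
  | nil => intro _; simp [aFind, PySem.Dict.get?]
  | cons k ks' ih =>
      intro hL
      have hkL : k.length = L := hL k (List.mem_cons_self ..)
      simp only [aFind, List.map_cons, PySem.Dict.get?_mk_cons, hkL]
      by_cases hk : s.take L = k
      · simp [hk]
      · have hbeq : (k == s.take L) = false := by
          simp only [beq_eq_false_iff_ne, ne_eq]
          exact fun h => hk h.symm
        rw [if_neg hk, if_neg (by simp [hbeq])]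
        exact ih (fun k hk => hL k (List.mem_cons_of_mem _ hk))

-- the three length groups of EVA_SORTED
def evaK3 : List (List Char) := ["cth".toList, "ckh".toList, "cph".toList, "cfh".toList, "pch".toList, "tch".toList, "sch".toList]
def evaK2 : List (List Char) := ["ch".toList, "sh".toList, "ck".toList, "cf".toList, "cp".toList]
def evaK1 : List (List Char) := ["k".toList, "t".toList, "p".toList, "f".toList, "d".toList, "l".toList, "r".toList, "s".toList, "n".toList, "m".toList, "g".toList, "q".toList, "a".toList, "o".toList, "e".toList, "i".toList, "y".toList, "u".toList]

lemma evaSorted_split : evaSorted = evaK3 ++ (evaK2 ++ evaK1) := by decide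

lemma dict3_eq : PySem.Dict.mk (evaK3.map (fun k => (k, (evaToCro.get? k).getD []))) = croT3 := by decide
lemma dict2_eq : PySem.Dict.mk (evaK2.map (fun k => (k, (evaToCro.get? k).getD []))) = croT2 := by decide
lemma dict1_eq : PySem.Dict.mk (evaK1.map (fun k => (k, (evaToCro.get? k).getD []))) = croT1 := by decide

-- the heart: at any position, scanning the longest-first key list equals the
-- three length-indexed lookups of B.
lemma find_step (c : Char) (rest : List Char) :
    aFind (c :: rest) evaSorted =
      match croT3.get? ((c :: rest).take 3) with
      | some r => some (r, 3)
      | none =>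
        match croT2.get? ((c :: rest).take 2) with
        | some r => some (r, 2)
        | none =>
          match croT1.get? [c] with
          | some r => some (r, 1)
          | none => none := by
  rw [evaSorted_split, aFind_append, aFind_append,
    aFind_fixed _ 3 evaK3 (by decide), aFind_fixed _ 2 evaK2 (by decide),
    aFind_fixed _ 1 evaK1 (by decide), dict3_eq, dict2_eq, dict1_eq]
  have h1 : (c :: rest).take 1 = [c] := rfl
  rw [h1]
  cases croT3.get? ((c :: rest).take 3) <;>
    cases croT2.get? ((c :: rest).take 2) <;>
      cases croT1.get? [c] <;> simp [Option.or]

lemma loop_eq : ∀ (fuel : Nat) (cs : List Char), cs.length ≤ fuel → aLoop fuel cs = bLoop cs := by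
  intro fuel
  induction fuel with
  | zero =>
      intro cs h
      have : cs = [] := by cases cs <;> simp_all
      subst this; rw [bLoop.eq_def]; rfl
  | succ n ih =>
      intro cs h
      cases cs with
      | nil => rw [bLoop.eq_def]; rfl
      | cons c rest =>
          rw [bLoop.eq_def]
          rw [show aLoop (n + 1) (c :: rest) = (match aFind (c :: rest) evaSorted with
              | some (o, L) => o :: aLoop n ((c :: rest).drop L)
              | none => [c] :: aLoop n rest) from rfl]
          rw [find_step]
          cases hg3 : croT3.get? ((c :: rest).take 3) with
          | some r =>
              simp only [hg3]
              exact congrArg _ (ih _ (by simp at h ⊢; omega))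
          | none =>
            simp only [hg3]
            cases hg2 : croT2.get? ((c :: rest).take 2) with
            | some r =>
                exact congrArg _ (ih _ (by simp at h ⊢; omega))
            | none =>
              cases hg1 : croT1.get? [c] with
              | some r =>
                  simp only [hg1, PySem.Dict.getD_eq_get?_getD, Option.getD_some]
                  exact congrArg _ (ih _ (by simp at h ⊢; omega))
              | none =>
                  simp only [hg1, PySem.Dict.getD_eq_get?_getD, Option.getD_none]
                  exact congrArg _ (ih _ (by simp at h ⊢; omega))

-- ===== VERDICT (by name: the statement is the Claim_ definition above) =====
theorem eva_to_croatian_spec : Claim_equal_eva_to_croatian := by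
  intro eva_text _
  unfold Spec_eva_to_croatian eva_to_croatian eva_to_croatian_alt
  exact congrArg String.ofList (congrArg (PySem.Chars.join [])
    (loop_eq (PySem.Chars.strip (PySem.Chars.lower eva_text.toList)).length
      (PySem.Chars.strip (PySem.Chars.lower eva_text.toList)) le_rfl))
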